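-- pv_equiv track=rewrite | github.com/rhakdnj/Algorithm | kakao/후보키/solve.py | check
-- ===== SOURCE A (Python) =====
-- def check(relation: list, row_size, col_size, subset):
--     for a in range(row_size - 1):
--         for b in range(a + 1, row_size):
--             is_same = True
--             for k in range(col_size):
--                 if (subset & 1 << k) == 0:
--                     continue
--                 if relation[a][k] != relation[b][k]:
--                     is_same = False
--                     break
--             if is_same:
--                 return False
--     return True
-- ===== SOURCE B (Python) =====
-- def check(relation: list, row_size, col_size, subset):
--     if row_size < 2:
--         return True
--     hi = min(col_size, subset.bit_length()) if subset >= 0 else col_size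
--     cols = [k for k in range(hi) if subset & (1 << k)]
--     seen = set()
--     for i in range(row_size):
--         key = tuple(relation[i][k] for k in cols)
--         if key in seen:
--             return False
--         seen.add(key)
--     return True
-- ===== Notes on version B (the rewrite author's own statement) =====
-- stated objective: faster
-- what changed: Replaced the O(row^2) pairwise comparison of projected rows (with an inner per-column compare loop) by a single pass that builds each row's projection on the selected columns once and checks it against a hash set of previously seen projections, returning False on the first repeat.
-- outside the precondition, e.g. on check([['a', 'b'], ['c']], 2, 2, 3): A returns True, B raises IndexError; on check([['x'], ['x'], []], 3, 1, 1): A returns False, B returns False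
import Mathlib
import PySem

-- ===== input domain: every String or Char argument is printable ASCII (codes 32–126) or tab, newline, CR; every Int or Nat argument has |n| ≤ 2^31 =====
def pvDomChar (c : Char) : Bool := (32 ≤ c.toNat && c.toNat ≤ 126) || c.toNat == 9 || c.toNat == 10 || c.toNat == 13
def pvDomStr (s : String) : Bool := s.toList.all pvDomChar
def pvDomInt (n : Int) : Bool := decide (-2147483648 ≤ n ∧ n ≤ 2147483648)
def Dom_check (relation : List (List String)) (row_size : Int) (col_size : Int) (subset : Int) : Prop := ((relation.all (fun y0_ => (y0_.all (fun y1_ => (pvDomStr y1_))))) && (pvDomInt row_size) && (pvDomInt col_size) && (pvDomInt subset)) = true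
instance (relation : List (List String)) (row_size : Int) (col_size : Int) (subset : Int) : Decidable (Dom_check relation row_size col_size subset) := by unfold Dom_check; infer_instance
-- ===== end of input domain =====

-- B replaces A's pairwise row comparison by one hashing pass over the projected rows (faster);
-- equivalence is about the return value, neither program mutates its arguments.

-- ===== PORT A =====
-- inner 'for k in range(col_size)' loop (lazy counter, as Python's range is): returns is_same
def checkRowEq (subset : Int) (ra rb : List String) (col_size : Int) (k : Int) : Bool :=
  if k < col_size then
    if PySem.Int.band subset ((1 : Int) <<< k.toNat) == 0 then checkRowEq subset ra rb col_size (k + 1)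
    else if ((PySem.List.pyGet? ra k).getD "") != ((PySem.List.pyGet? rb k).getD "") then false
    else checkRowEq subset ra rb col_size (k + 1)
  else true
termination_by (col_size - k).toNat
decreasing_by all_goals omega

-- 'for b in range(a+1, row_size)' loop: true iff some b makes is_same hold (→ return False)
def checkFindDup (relation : List (List String)) (col_size subset : Int) (ra : List String) (row_size : Int) (b : Int) : Bool :=
  if b < row_size then
    if checkRowEq subset ra ((PySem.List.pyGet? relation b).getD []) col_size 0 then true
    else checkFindDup relation col_size subset ra row_size (b + 1)
  else false
termination_by (row_size - b).toNat
decreasing_by all_goals omega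

-- outer 'for a in range(row_size - 1)' loop
def checkOuter (relation : List (List String)) (row_size col_size subset : Int) (a : Int) : Bool :=
  if a < row_size - 1 then
    if checkFindDup relation col_size subset ((PySem.List.pyGet? relation a).getD []) row_size (a + 1) then false
    else checkOuter relation row_size col_size subset (a + 1)
  else true
termination_by (row_size - 1 - a).toNat
decreasing_by all_goals omega

def check (relation : List (List String)) (row_size : Int) (col_size : Int) (subset : Int) : Bool :=
  checkOuter relation row_size col_size subset 0

-- ===== PORT B =====
-- hi = min(col_size, subset.bit_length()) if subset >= 0 else col_size
-- cols = [k for k in range(hi) if subset & (1 << k)]  (built eagerly, as the list comprehension is)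
def bitCols (col_size subset : Int) : List Int :=
  let hi : Int := if 0 ≤ subset then min col_size ((PySem.Int.bitLength subset : Nat) : Int) else col_size
  (PySem.List.pyRange 0 hi 1).filter (fun k => PySem.Int.band subset ((1 : Int) <<< k.toNat) != 0)

-- key = tuple(row[k] for k in cols)
def projRow (cols : List Int) (row : List String) : List String :=
  cols.map (fun k => (PySem.List.pyGet? row k).getD "")

-- 'for i in range(row_size)' loop with the seen set (lazy counter, as Python's range is)
def altLoop (relation : List (List String)) (cols : List Int) (row_size : Int) (i : Int) (seen : PySem.Set (List String)) : Bool :=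
  if i < row_size then
    let key := projRow cols ((PySem.List.pyGet? relation i).getD [])
    if PySem.Set.contains seen key then false
    else altLoop relation cols row_size (i + 1) (PySem.Set.add seen key)
  else true
termination_by (row_size - i).toNat
decreasing_by all_goals omega

def check_alt (relation : List (List String)) (row_size : Int) (col_size : Int) (subset : Int) : Bool :=
  if row_size < 2 then true
  else altLoop relation (bitCols col_size subset) row_size 0 PySem.Set.empty

-- ===== PRECONDITION & SPEC =====
-- Pre_ excludes inputs where a projected cell index relation[i][k] (i < row_size, k a selected
-- column) is out of range: there the Python programs can raise IndexError (B builds every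
-- projection, A may stop earlier or skip a cell after an early column mismatch, so on a few such
-- inputs A still returns a value while B raises). When no column is selected neither program
-- indexes relation, so no bound is required then. It is a sufficient bounds condition, hence
-- slightly narrower than the exact set of inputs on which both Pythons return.
def Pre_check (relation : List (List String)) (row_size : Int) (col_size : Int) (subset : Int) : Prop :=
  ((∃ k : Nat, k < 32 ∧ (k : Int) < col_size ∧ PySem.Int.band subset ((1 : Int) <<< k) ≠ 0) ∨
    (subset < 0 ∧ 32 ≤ col_size)) →
  ((1 ≤ row_size → row_size ≤ (relation.length : Int)) ∧
   ∀ row ∈ relation.take row_size.toNat,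
     (∀ k : Nat, k < 32 → (k : Int) < col_size → PySem.Int.band subset ((1 : Int) <<< k) ≠ 0 → k < row.length) ∧
     (subset < 0 → col_size ≤ (row.length : Int)))
instance (relation : List (List String)) (row_size : Int) (col_size : Int) (subset : Int) : Decidable (Pre_check relation row_size col_size subset) := by unfold Pre_check; infer_instance

def pvWitness_check : List (List String) × Int × Int × Int := ([["a"], ["b"]], 2, 1, 1)

def Spec_check (relation : List (List String)) (row_size : Int) (col_size : Int) (subset : Int) (out : Bool) : Prop := out = check_alt relation row_size col_size subset
instance (relation : List (List String)) (row_size : Int) (col_size : Int) (subset : Int) (out : Bool) : Decidable (Spec_check relation row_size col_size subset out) := by unfold Spec_check; infer_instance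

-- ===== CLAIM (what is proved, stated in full; the proofs are below) =====
def Claim_equal_check : Prop := ∀ (relation : List (List String)) (row_size : Int) (col_size : Int) (subset : Int), Dom_check relation row_size col_size subset → Pre_check relation row_size col_size subset → Spec_check relation row_size col_size subset (check relation row_size col_size subset)

-- ===== LEMMAS AND PROOFS =====

-- the selected columns, written as the full filter over range(col_size)
def colsFull (col_size subset : Int) : List Int :=
  (PySem.List.pyRange 0 col_size 1).filter (fun k => PySem.Int.band subset ((1 : Int) <<< k.toNat) != 0)

-- a bit at or above bit_length of a nonnegative number is 0
theorem band_shift_eq_zero (s : Int) (hs : 0 ≤ s) (j : Nat) (hj : PySem.Int.bitLength s ≤ j) :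
    PySem.Int.band s ((1 : Int) <<< j) = 0 := by
  have h1 : ((1 : Int) <<< j) = ((2 ^ j : Nat) : Int) := by
    rw [Int.shiftLeft_eq]; push_cast; ring
  have h2 : (0 : Int) ≤ (1 : Int) <<< j := by rw [h1]; positivity
  rw [PySem.Int.band_of_nonneg hs h2]
  have h3 : ((1 : Int) <<< j).toNat = 2 ^ j := by rw [h1]; exact Int.toNat_natCast _
  have h4 : s.toNat < 2 ^ j := by
    have := PySem.Int.lt_two_pow_bitLength s
    have hle : (2 : Nat) ^ PySem.Int.bitLength s ≤ 2 ^ j := Nat.pow_le_pow_right (by norm_num) hj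
    omega
  rw [h3, Nat.and_two_pow, Nat.testBit_lt_two_pow h4]
  simp

-- B's bit_length-bounded column scan selects the same columns as the full filter
theorem bitCols_eq (col_size subset : Int) : bitCols col_size subset = colsFull col_size subset := by
  unfold bitCols colsFull
  by_cases hs : 0 ≤ subset
  · simp only [if_pos hs]
    by_cases hc : col_size ≤ ((PySem.Int.bitLength subset : Nat) : Int)
    · rw [min_eq_left hc]
    · rw [min_eq_right (le_of_not_ge hc)]
      rw [PySem.List.pyRange_one_append 0 ((PySem.Int.bitLength subset : Nat) : Int) col_size
        (by positivity) (by omega), List.filter_append,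
        List.self_eq_append_right, List.filter_eq_nil_iff]
      intro j hj
      rw [PySem.List.mem_pyRange_one] at hj
      have hb : PySem.Int.band subset ((1 : Int) <<< j.toNat) = 0 :=
        band_shift_eq_zero subset hs j.toNat (by omega)
      rw [hb]
      decide
  · simp only [if_neg hs]

-- the projection key of row i
def keyAt (relation : List (List String)) (cols : List Int) (i : Int) : List String :=
  projRow cols ((PySem.List.pyGet? relation i).getD [])

-- list-of-indices forms of the four loops, to reason over pyRange as a list
def checkRowEqL (subset : Int) (ra rb : List String) : List Int → Bool
  | [] => true
  | k :: ks =>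
    if PySem.Int.band subset ((1 : Int) <<< k.toNat) == 0 then checkRowEqL subset ra rb ks
    else if ((PySem.List.pyGet? ra k).getD "") != ((PySem.List.pyGet? rb k).getD "") then false
    else checkRowEqL subset ra rb ks

def checkFindDupL (relation : List (List String)) (col_size subset : Int) (ra : List String) : List Int → Bool
  | [] => false
  | b :: bs =>
    if checkRowEqL subset ra ((PySem.List.pyGet? relation b).getD []) (PySem.List.pyRange 0 col_size 1) then true
    else checkFindDupL relation col_size subset ra bs

def checkOuterL (relation : List (List String)) (row_size col_size subset : Int) : List Int → Bool
  | [] => true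
  | a :: as =>
    if checkFindDupL relation col_size subset ((PySem.List.pyGet? relation a).getD []) (PySem.List.pyRange (a + 1) row_size 1) then false
    else checkOuterL relation row_size col_size subset as

def altLoopL (relation : List (List String)) (cols : List Int) : List Int → PySem.Set (List String) → Bool
  | [], _ => true
  | i :: is, seen =>
    let key := projRow cols ((PySem.List.pyGet? relation i).getD [])
    if PySem.Set.contains seen key then false
    else altLoopL relation cols is (PySem.Set.add seen key)

-- the counter loops compute the list forms over the corresponding pyRange
theorem checkRowEq_eq (subset : Int) (ra rb : List String) (col_size k : Int) :
    checkRowEq subset ra rb col_size k = checkRowEqL subset ra rb (PySem.List.pyRange k col_size 1) := by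
  fun_induction checkRowEq with
  | case1 k h hb ih => rw [PySem.List.pyRange_one_cons h, checkRowEqL, if_pos hb, ih]
  | case2 k h hb hne => rw [PySem.List.pyRange_one_cons h, checkRowEqL, if_neg hb, if_pos hne]
  | case3 k h hb hne ih => rw [PySem.List.pyRange_one_cons h, checkRowEqL, if_neg hb, if_neg hne, ih]
  | case4 k h => rw [PySem.List.pyRange_one_eq_nil (by omega), checkRowEqL]

theorem checkFindDup_eq (relation : List (List String)) (col_size subset : Int) (ra : List String) (row_size b : Int) :
    checkFindDup relation col_size subset ra row_size b =
      checkFindDupL relation col_size subset ra (PySem.List.pyRange b row_size 1) := by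
  fun_induction checkFindDup with
  | case1 b h hs => rw [PySem.List.pyRange_one_cons h, checkFindDupL, ← checkRowEq_eq, if_pos hs]
  | case2 b h hs ih => rw [PySem.List.pyRange_one_cons h, checkFindDupL, ← checkRowEq_eq, if_neg hs, ih]
  | case3 b h => rw [PySem.List.pyRange_one_eq_nil (by omega), checkFindDupL]

theorem checkOuter_eq (relation : List (List String)) (row_size col_size subset a : Int) :
    checkOuter relation row_size col_size subset a =
      checkOuterL relation row_size col_size subset (PySem.List.pyRange a (row_size - 1) 1) := by
  fun_induction checkOuter with
  | case1 a h hs => rw [PySem.List.pyRange_one_cons h, checkOuterL, ← checkFindDup_eq, if_pos hs]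
  | case2 a h hs ih => rw [PySem.List.pyRange_one_cons h, checkOuterL, ← checkFindDup_eq, if_neg hs, ih]
  | case3 a h => rw [PySem.List.pyRange_one_eq_nil (by omega), checkOuterL]

theorem altLoop_eq (relation : List (List String)) (cols : List Int) (row_size i : Int) (seen : PySem.Set (List String)) :
    altLoop relation cols row_size i seen = altLoopL relation cols (PySem.List.pyRange i row_size 1) seen := by
  fun_induction altLoop with
  | case1 i seen h key hc =>
    rw [PySem.List.pyRange_one_cons h]
    have hc' : seen.contains (projRow cols ((PySem.List.pyGet? relation i).getD [])) = true := hc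
    simp only [altLoopL, if_pos hc']
  | case2 i seen h key hc ih =>
    rw [PySem.List.pyRange_one_cons h]
    have hc' : ¬ seen.contains (projRow cols ((PySem.List.pyGet? relation i).getD [])) = true := hc
    simp only [altLoopL, if_neg hc']
    exact ih
  | case3 i seen h => rw [PySem.List.pyRange_one_eq_nil (by omega), altLoopL]

theorem checkRowEqL_iff (subset : Int) (ra rb : List String) (ks : List Int) :
    checkRowEqL subset ra rb ks = true ↔
      ∀ k ∈ ks, PySem.Int.band subset ((1 : Int) <<< k.toNat) ≠ 0 →
        (PySem.List.pyGet? ra k).getD "" = (PySem.List.pyGet? rb k).getD "" := by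
  induction ks with
  | nil => simp [checkRowEqL]
  | cons k ks ih =>
    simp only [checkRowEqL]
    split_ifs with h1 h2
    · simp only [beq_iff_eq] at h1
      simp [ih, h1]
    · simp only [bne_iff_ne, ne_eq] at h2
      simp only [beq_iff_eq] at h1
      constructor
      · intro h; simp at h
      · intro h
        exact absurd (h k (by simp) h1) h2
    · simp only [bne_iff_ne, ne_eq, not_not] at h2
      simp [ih, h2]

theorem checkRowEqL_proj (col_size subset : Int) (ra rb : List String) :
    checkRowEqL subset ra rb (PySem.List.pyRange 0 col_size 1) = true ↔
      projRow (colsFull col_size subset) ra = projRow (colsFull col_size subset) rb := by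
  rw [checkRowEqL_iff]
  unfold projRow colsFull
  rw [List.map_inj_left]
  constructor
  · intro h k hk
    rw [List.mem_filter] at hk
    exact h k hk.1 (by simpa using hk.2)
  · intro h k hk hb
    exact h k (List.mem_filter.2 ⟨hk, by simpa using hb⟩)

theorem checkFindDupL_iff (relation : List (List String)) (col_size subset : Int) (ra : List String) (bs : List Int) :
    checkFindDupL relation col_size subset ra bs = true ↔
      ∃ b ∈ bs, projRow (colsFull col_size subset) ra = keyAt relation (colsFull col_size subset) b := by
  induction bs with
  | nil => simp [checkFindDupL]
  | cons b bs ih =>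
    simp only [checkFindDupL]
    split_ifs with h
    · rw [checkRowEqL_proj] at h
      simp only [true_iff]
      exact ⟨b, by simp, h⟩
    · rw [checkRowEqL_proj] at h
      rw [ih]
      constructor
      · rintro ⟨b', hb', he⟩; exact ⟨b', by simp [hb'], he⟩
      · rintro ⟨b', hb', he⟩
        rcases List.mem_cons.1 hb' with rfl | hb'
        · exact absurd he h
        · exact ⟨b', hb', he⟩

theorem checkOuterL_iff (relation : List (List String)) (row_size col_size subset : Int) (as : List Int) :
    checkOuterL relation row_size col_size subset as = true ↔
      ∀ a ∈ as, ¬ ∃ b ∈ PySem.List.pyRange (a + 1) row_size 1,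
        keyAt relation (colsFull col_size subset) a = keyAt relation (colsFull col_size subset) b := by
  induction as with
  | nil => simp [checkOuterL]
  | cons a as ih =>
    simp only [checkOuterL]
    split_ifs with h
    · rw [checkFindDupL_iff] at h
      simp only [false_iff, not_forall]
      exact ⟨a, by simp, fun hn => hn h⟩
    · rw [checkFindDupL_iff] at h
      rw [ih]
      constructor
      · intro hall a' ha'
        rcases List.mem_cons.1 ha' with rfl | ha'
        · exact h
        · exact hall a' ha'
      · intro hall a' ha'
        exact hall a' (by simp [ha'])

theorem altLoopL_iff (relation : List (List String)) (cols : List Int) (is : List Int) (seen : PySem.Set (List String)) :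
    altLoopL relation cols is seen = true ↔
      (is.map (keyAt relation cols)).Nodup ∧ ∀ i ∈ is, keyAt relation cols i ∉ seen := by
  induction is generalizing seen with
  | nil => simp [altLoopL]
  | cons i is ih =>
    have hloop : altLoopL relation cols (i :: is) seen =
        if keyAt relation cols i ∈ seen then false
        else altLoopL relation cols is (PySem.Set.add seen (keyAt relation cols i)) := by
      simp only [altLoopL, keyAt]
      by_cases h : projRow cols ((PySem.List.pyGet? relation i).getD []) ∈ seen
      · rw [if_pos ((PySem.Set.contains_iff _ _).2 h), if_pos h]
      · rw [if_neg (fun hc => h ((PySem.Set.contains_iff _ _).1 hc)), if_neg h]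
    rw [hloop]
    by_cases h : keyAt relation cols i ∈ seen
    · simp only [if_pos h]
      simp only [List.mem_cons, show (false = true) = False by simp, false_iff, not_and]
      intro _ hall
      exact (hall i (Or.inl rfl)) h
    · simp only [if_neg h, ih]
      simp only [List.map_cons, List.nodup_cons, List.mem_map, PySem.Set.mem_add, List.mem_cons]
      constructor
      · rintro ⟨hnd, hall⟩
        refine ⟨⟨fun ⟨j, hj, hje⟩ => (hall j hj) (Or.inr hje), hnd⟩, fun j hj => ?_⟩
        rcases hj with rfl | hj
        · exact h
        · exact fun hs => (hall j hj) (Or.inl hs)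
      · rintro ⟨⟨hni, hnd⟩, hall⟩
        refine ⟨hnd, fun j hj hor => ?_⟩
        rcases hor with hs | hje
        · exact (hall j (Or.inr hj)) hs
        · exact hni ⟨j, hj, hje⟩

theorem nodup_map_pyRange_iff {α : Type} [DecidableEq α] (K : Int → α) (n : Int) :
    ((PySem.List.pyRange 0 n 1).map K).Nodup ↔
      ∀ a b : Int, 0 ≤ a → a < b → b < n → K a ≠ K b := by
  rw [PySem.List.pyRange_one, List.map_map]
  rw [List.Nodup, List.pairwise_map, List.pairwise_iff_getElem]
  simp only [List.length_range, List.getElem_range, Function.comp]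
  constructor
  · intro h a b ha hab hbn
    have hb : b.toNat < (n - 0).toNat := by omega
    have := h a.toNat b.toNat (by omega) hb (by omega)
    simpa [Int.toNat_of_nonneg ha, Int.toNat_of_nonneg (by omega : (0:Int) ≤ b)] using this
  · intro h i j hi hj hij
    have := h i j (by omega) (by exact_mod_cast hij) (by omega)
    simpa using this

-- ===== VERDICT (by name: the statement is the Claim_ definition above) =====
theorem check_spec : Claim_equal_check := by
  intro relation row_size col_size subset _ _
  unfold Spec_check check check_alt
  by_cases hrs : row_size < 2
  · rw [if_pos hrs, checkOuter_eq, PySem.List.pyRange_one_eq_nil (by omega)]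
    simp [checkOuterL]
  rw [if_neg hrs, bitCols_eq, checkOuter_eq, altLoop_eq]
  rw [Bool.eq_iff_iff, checkOuterL_iff, altLoopL_iff, nodup_map_pyRange_iff]
  have hempty : ∀ i ∈ PySem.List.pyRange 0 row_size 1,
      keyAt relation (colsFull col_size subset) i ∉ (PySem.Set.empty : PySem.Set (List String)) := by
    intro i _ hmem
    simp [PySem.Set.empty] at hmem
  constructor
  · intro h
    refine ⟨fun a b ha hab hbn heq => ?_, hempty⟩
    exact h a ((PySem.List.mem_pyRange_one).2 ⟨ha, by omega⟩)
      ⟨b, (PySem.List.mem_pyRange_one).2 ⟨by omega, hbn⟩, heq⟩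
  · rintro ⟨h, -⟩ a ha ⟨b, hb, heq⟩
    rw [PySem.List.mem_pyRange_one] at ha hb
    exact h a b (by omega) (by omega) (by omega) heq
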